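-- pv_equiv track=rewrite | github.com/less55093-collab/testgeo | crawler/analyzer/statistics_calculator.py | _guess_site_name
-- ===== SOURCE A (Python) =====
-- def _guess_site_name(domain: str) -> str | None:
--     """Guess common Chinese site names from domain."""
--     domain = (domain or "").lower()
--     if not domain:
--         return None
--
--     # Longest suffix first.
--     suffix_map = [
--         ("baike.baidu.com", "百度百科"),
--         ("zhihu.com", "知乎"),
--         ("xiaohongshu.com", "小红书"),
--         ("weibo.com", "微博"),
--         ("bilibili.com", "哔哩哔哩"),
--         ("douban.com", "豆瓣"),
--         ("sohu.com", "搜狐"),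
--         ("sina.com.cn", "新浪"),
--         ("qq.com", "腾讯"),
--         ("163.com", "网易"),
--         ("csdn.net", "CSDN"),
--         ("jianshu.com", "简书"),
--         ("people.com.cn", "人民网"),
--     ]
--
--     for suffix, name in suffix_map:
--         if domain == suffix or domain.endswith(f".{suffix}"):
--             return name
--
--     return None
-- ===== SOURCE B (Python) =====
-- _TABLE = {
--     ("baike", "baidu", "com"): "百度百科",
--     ("zhihu", "com"): "知乎",
--     ("xiaohongshu", "com"): "小红书",
--     ("weibo", "com"): "微博",
--     ("bilibili", "com"): "哔哩哔哩",
--     ("douban", "com"): "豆瓣",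
--     ("sohu", "com"): "搜狐",
--     ("sina", "com", "cn"): "新浪",
--     ("qq", "com"): "腾讯",
--     ("163", "com"): "网易",
--     ("csdn", "net"): "CSDN",
--     ("jianshu", "com"): "简书",
--     ("people", "com", "cn"): "人民网",
-- }
--
--
-- def _guess_site_name(domain):
--     """Guess common Chinese site names from domain: split into labels, probe a
--     label-tuple-keyed table on each successively shorter label suffix."""
--     domain = (domain or "").lower()
--     if not domain:
--         return None
--     labels = domain.split(".")
--     while labels:
--         hit = _TABLE.get(tuple(labels))
--         if hit is not None:
--             return hit
--         labels = labels[1:]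
--     return None
-- ===== Notes on version B (the rewrite author's own statement) =====
-- stated objective: alternative
-- what changed: B splits the domain once into its dot-separated labels and probes a dict keyed by label tuples on each successively shorter label suffix, instead of A's scan of a 13-entry suffix list with an endswith test per entry.
import Mathlib
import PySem

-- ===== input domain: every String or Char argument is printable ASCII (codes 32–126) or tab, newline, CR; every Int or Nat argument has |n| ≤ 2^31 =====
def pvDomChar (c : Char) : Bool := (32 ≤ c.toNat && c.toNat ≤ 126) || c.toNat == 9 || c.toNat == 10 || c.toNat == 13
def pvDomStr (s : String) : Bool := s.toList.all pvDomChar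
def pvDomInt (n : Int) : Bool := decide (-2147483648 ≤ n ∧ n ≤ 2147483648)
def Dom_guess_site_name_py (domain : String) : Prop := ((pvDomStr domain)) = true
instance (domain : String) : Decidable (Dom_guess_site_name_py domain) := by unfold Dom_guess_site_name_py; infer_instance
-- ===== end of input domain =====

-- B splits the domain into its dot-separated labels once and probes a table keyed by
-- label tuples on each successively shorter label suffix, instead of scanning A's fixed
-- suffix list with endswith tests (objective: alternative; same return value everywhere).

-- ===== PORT A =====
-- A's literal suffix list, longest first (same order as the Python).
def aSuffixMap : List (String × String) :=
  [ ("baike.baidu.com", "百度百科"),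
    ("zhihu.com", "知乎"),
    ("xiaohongshu.com", "小红书"),
    ("weibo.com", "微博"),
    ("bilibili.com", "哔哩哔哩"),
    ("douban.com", "豆瓣"),
    ("sohu.com", "搜狐"),
    ("sina.com.cn", "新浪"),
    ("qq.com", "腾讯"),
    ("163.com", "网易"),
    ("csdn.net", "CSDN"),
    ("jianshu.com", "简书"),
    ("people.com.cn", "人民网") ]

-- A's for-loop with early return: `domain == suffix or domain.endswith(f".{suffix}")`.
-- (f".{suffix}" is ported exactly as the char list '.' :: suffix.toList.)
def aLoop (d : List Char) : List (String × String) → Option String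
  | [] => none
  | (s, n) :: rest =>
      if d = s.toList ∨ PySem.Chars.endswith d ('.' :: s.toList) = true then some n
      else aLoop d rest

def guess_site_name_py (domain : String) : Option String :=
  -- `domain = (domain or "").lower()`: for a str argument, `domain or ""` is `domain`
  -- when non-empty and `""` otherwise; lower maps both the same way.
  let d := PySem.Chars.lower domain.toList
  if d = [] then none else aLoop d aSuffixMap

-- ===== PORT B =====
-- B's dict literal: keys are the label TUPLES of each suffix (tuple of str → List (List Char)).
def bTable : PySem.Dict (List (List Char)) String :=
  PySem.Dict.ofList
    [ (["baike".toList, "baidu".toList, "com".toList], "百度百科"),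
      (["zhihu".toList, "com".toList], "知乎"),
      (["xiaohongshu".toList, "com".toList], "小红书"),
      (["weibo".toList, "com".toList], "微博"),
      (["bilibili".toList, "com".toList], "哔哩哔哩"),
      (["douban".toList, "com".toList], "豆瓣"),
      (["sohu".toList, "com".toList], "搜狐"),
      (["sina".toList, "com".toList, "cn".toList], "新浪"),
      (["qq".toList, "com".toList], "腾讯"),
      (["163".toList, "com".toList], "网易"),
      (["csdn".toList, "net".toList], "CSDN"),
      (["jianshu".toList, "com".toList], "简书"),
      (["people".toList, "com".toList, "cn".toList], "人民网") ]

-- B's `while labels:` loop: probe the table at the current label suffix, then drop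
-- the leading label (`labels = labels[1:]`); the empty tuple ends the loop with None.
def bSeek : List (List Char) → Option String
  | [] => none
  | lbl :: more =>
      match bTable.get? (lbl :: more) with
      | some hit => some hit
      | none => bSeek more

def guess_site_name_py_alt (domain : String) : Option String :=
  let t := PySem.Chars.lower domain.toList
  if t.isEmpty then none
  else bSeek (PySem.Chars.splitOn t ['.'])

-- ===== PRECONDITION & SPEC =====
def Spec_guess_site_name_py (domain : String) (out : Option String) : Prop := out = guess_site_name_py_alt domain
instance (domain : String) (out : Option String) : Decidable (Spec_guess_site_name_py domain out) := by unfold Spec_guess_site_name_py; infer_instance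

-- ===== CLAIM (what is proved, stated in full; the proofs are below) =====
def Claim_equal_guess_site_name_py : Prop := ∀ (domain : String), Dom_guess_site_name_py domain → Spec_guess_site_name_py domain (guess_site_name_py domain)

-- ===== LEMMAS AND PROOFS =====

-- ---- a simple structural model of str.split(".") ----

-- splitting on '.' as plain structural recursion
def sp : List Char → List (List Char)
  | [] => [[]]
  | c :: r =>
      if c = '.' then [] :: sp r
      else
        match sp r with
        | [] => [[c]]
        | h :: t => (c :: h) :: t

-- joining labels back with '.'
def jd : List (List Char) → List Char
  | [] => []
  | [x] => x
  | x :: y :: t => x ++ '.' :: jd (y :: t)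

def consHead (p : List Char) : List (List Char) → List (List Char)
  | [] => [p]
  | h :: t => (p ++ h) :: t

theorem sp_ne_nil (l : List Char) : sp l ≠ [] := by
  cases l with
  | nil => simp [sp]
  | cons c r =>
      simp only [sp]
      split_ifs
      · simp
      · cases sp r <;> simp

theorem go_spec (fuel : Nat) : ∀ (l cur : List Char) (acc : List (List Char)),
    l.length < fuel →
    PySem.Chars.splitOn.go ['.'] fuel l cur acc = acc.reverse ++ consHead cur.reverse (sp l) := by
  induction fuel with
  | zero => intro l cur acc h; omega
  | succ f ih =>
      intro l cur acc h
      cases l with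
      | nil =>
          simp [PySem.Chars.splitOn.go, sp, consHead]
      | cons c rest =>
          by_cases hc : c = '.'
          · subst hc
            have : PySem.Chars.splitOn.go ['.'] (f + 1) ('.' :: rest) cur acc
                = PySem.Chars.splitOn.go ['.'] f rest [] (cur.reverse :: acc) := by
              simp [PySem.Chars.splitOn.go, List.isPrefixOf]
            rw [this, ih rest [] (cur.reverse :: acc) (by simpa using Nat.lt_of_succ_lt_succ h)]
            cases hs : sp rest with
            | nil => exact absurd hs (sp_ne_nil rest)
            | cons h2 t2 => simp [sp, consHead, hs]
          · have : PySem.Chars.splitOn.go ['.'] (f + 1) (c :: rest) cur acc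
                = PySem.Chars.splitOn.go ['.'] f rest (c :: cur) acc := by
              simp [PySem.Chars.splitOn.go, List.isPrefixOf]
              intro hcc; exact absurd hcc.symm hc
            rw [this, ih rest (c :: cur) acc (by simpa using Nat.lt_of_succ_lt_succ h)]
            cases hs : sp rest with
            | nil => exact absurd hs (sp_ne_nil rest)
            | cons h2 t2 => simp [sp, consHead, hs, hc]

theorem splitOn_eq_sp (s : List Char) : PySem.Chars.splitOn s ['.'] = sp s := by
  show PySem.Chars.splitOn.go ['.'] (s.length + 1) s [] [] = sp s
  rw [go_spec (s.length + 1) s [] [] (by omega)]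
  cases hs : sp s with
  | nil => exact absurd hs (sp_ne_nil s)
  | cons h t => simp [consHead]

theorem sp_dotfree (l : List Char) : ∀ x ∈ sp l, '.' ∉ x := by
  induction l with
  | nil => simp [sp]
  | cons c r ih =>
      simp only [sp]
      split_ifs with hc
      · intro x hx
        rcases List.mem_cons.1 hx with rfl | hx'
        · simp
        · exact ih x hx'
      · cases hs : sp r with
        | nil => exact absurd hs (sp_ne_nil r)
        | cons h t =>
            intro x hx
            rcases List.mem_cons.1 hx with rfl | hx'
            · intro hmem
              rcases List.mem_cons.1 hmem with h1 | h1
              · exact hc h1.symm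
              · exact ih h (hs ▸ List.mem_cons_self ..) h1
            · exact ih x (hs ▸ List.mem_cons_of_mem _ hx')

theorem jd_cons (x : List Char) (ls : List (List Char)) (h : ls ≠ []) :
    jd (x :: ls) = x ++ '.' :: jd ls := by
  cases ls with
  | nil => exact absurd rfl h
  | cons y t => simp [jd]

theorem jd_sp (l : List Char) : jd (sp l) = l := by
  induction l with
  | nil => simp [sp, jd]
  | cons c r ih =>
      simp only [sp]
      split_ifs with hc
      · rw [jd_cons _ _ (sp_ne_nil r), ih, hc]; simp
      · cases hs : sp r with
        | nil => exact absurd hs (sp_ne_nil r)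
        | cons h t =>
            rw [hs] at ih
            cases t with
            | nil => simp [jd] at ih ⊢; exact ih
            | cons y t2 =>
                rw [jd_cons _ _ (by simp)] at ih ⊢
                simpa using ih

-- joining is injective on label lists whose labels contain no dot
theorem jd_inj : ∀ (l1 l2 : List (List Char)), l1 ≠ [] → l2 ≠ [] →
    (∀ x ∈ l1, '.' ∉ x) → (∀ x ∈ l2, '.' ∉ x) → jd l1 = jd l2 → l1 = l2 := by
  intro l1
  induction l1 with
  | nil => intro l2 h1; exact absurd rfl h1
  | cons x t1 ih =>
      intro l2 _ h2 hd1 hd2 hj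
      cases l2 with
      | nil => exact absurd rfl h2
      | cons y t2 =>
          -- first, the heads agree: a dot-free prefix before the first dot is unique
          have hx : '.' ∉ x := hd1 x (List.mem_cons_self ..)
          have hy : '.' ∉ y := hd2 y (List.mem_cons_self ..)
          cases t1 with
          | nil =>
              cases t2 with
              | nil => simp [jd] at hj; rw [hj]
              | cons z t2' =>
                  rw [jd_cons y (z :: t2') (by simp)] at hj
                  simp only [jd] at hj
                  exact absurd (by rw [hj]; exact List.mem_append_right y (List.mem_cons_self ..)) hx
          | cons w t1' =>
              cases t2 with
              | nil =>
                  rw [jd_cons x (w :: t1') (by simp)] at hj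
                  simp only [jd] at hj
                  exact absurd (by rw [hj.symm]; exact List.mem_append_right x (List.mem_cons_self ..)) hy
              | cons z t2' =>
                  rw [jd_cons x (w :: t1') (by simp), jd_cons y (z :: t2') (by simp)] at hj
                  -- x ++ '.'::A = y ++ '.'::B with x, y dot-free forces x = y, A = B
                  have key : ∀ (a b : List Char) (A B : List Char), '.' ∉ a → '.' ∉ b →
                      a ++ '.' :: A = b ++ '.' :: B → a = b ∧ A = B := by
                    intro a
                    induction a with
                    | nil =>
                        intro b A B _ hb he
                        cases b with
                        | nil => simpa using he
                        | cons c b' =>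
                            simp only [List.nil_append, List.cons_append, List.cons.injEq] at he
                            exact absurd (he.1 ▸ List.mem_cons_self ..) hb
                    | cons c a' iha =>
                        intro b A B ha hb he
                        cases b with
                        | nil =>
                            simp only [List.nil_append, List.cons_append, List.cons.injEq] at he
                            exact absurd (he.1.symm ▸ List.mem_cons_self ..) ha
                        | cons c' b' =>
                            simp only [List.cons_append, List.cons.injEq] at he
                            obtain ⟨rfl, he2⟩ := he
                            have := iha b' A B (fun h => ha (List.mem_cons_of_mem _ h))
                              (fun h => hb (List.mem_cons_of_mem _ h)) he2
                            exact ⟨by rw [this.1], this.2⟩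
                  obtain ⟨rfl, hj2⟩ := key x y _ _ hx hy hj
                  have := ih (z :: t2') (by simp) (by simp)
                    (fun u hu => hd1 u (List.mem_cons_of_mem _ hu))
                    (fun u hu => hd2 u (List.mem_cons_of_mem _ hu)) hj2
                  rw [this]

-- a suffix of d that is at most as long as another suffix of d is a suffix of it
theorem suffix_of_suffix_le {a b d : List Char} (ha : a <:+ d) (hb : b <:+ d)
    (hlen : a.length ≤ b.length) : a <:+ b := by
  rcases List.suffix_or_suffix_of_suffix ha hb with h | h
  · exact h
  · have := List.IsSuffix.eq_of_length h (le_antisymm (List.IsSuffix.length_le h) hlen)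
    exact this ▸ List.suffix_refl a

-- the dot-boundary suffixes of a joined dot-free label list are exactly the joins
-- of its proper nonempty label-list suffixes
theorem dotsuffix_iff : ∀ (L : List (List Char)), L ≠ [] → (∀ x ∈ L, '.' ∉ x) →
    ∀ k : List Char, (('.' :: k) <:+ jd L ↔ ∃ S, S <:+ L ∧ S ≠ [] ∧ S ≠ L ∧ k = jd S) := by
  intro L
  induction L with
  | nil => intro h; exact absurd rfl h
  | cons x M ih =>
      intro _ hdf k
      cases M with
      | nil =>
          simp only [jd]
          constructor
          · intro h
            have : '.' ∈ x := List.IsSuffix.subset h (List.mem_cons_self ..)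
            exact absurd this (hdf x (List.mem_cons_self ..))
          · rintro ⟨S, hS, hne, hnL, _⟩
            rcases List.suffix_cons_iff.1 hS with rfl | hS'
            · exact absurd rfl hnL
            · simp at hS'; exact absurd hS' hne
      | cons y M' =>
          rw [jd_cons x (y :: M') (by simp)]
          have hdfM : ∀ u ∈ y :: M', '.' ∉ u := fun u hu => hdf u (List.mem_cons_of_mem _ hu)
          constructor
          · intro h
            have hsufR : ('.' :: jd (y :: M')) <:+ x ++ '.' :: jd (y :: M') :=
              List.suffix_append _ _
            by_cases hlen : ('.' :: k).length ≤ ('.' :: jd (y :: M')).length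
            · have hks : ('.' :: k) <:+ ('.' :: jd (y :: M')) :=
                suffix_of_suffix_le h hsufR hlen
              rcases List.suffix_cons_iff.1 hks with he | hks'
              · -- k = jd (y :: M'): take S = y :: M'
                obtain rfl : k = jd (y :: M') := by injection he
                refine ⟨y :: M', List.suffix_cons _ _, by simp, ?_, rfl⟩
                intro heq
                have := congrArg List.length heq
                simp at this
              · rcases (ih (by simp) hdfM k).1 hks' with ⟨S, hS, hne, _, hk⟩
                exact ⟨S, hS.trans (List.suffix_cons _ _), hne, by
                  intro heq
                  have h1 := List.IsSuffix.length_le hS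
                  have := congrArg List.length heq
                  simp at this h1
                  omega, hk⟩
            · -- '.'::k is longer than '.'::jd (y::M'): its dot would lie inside x
              exfalso
              rcases h with ⟨w, hw⟩
              have hlw : w.length < x.length := by
                have := congrArg List.length hw
                simp at this hlen ⊢
                omega
              have hpw : w <+: x := by
                apply List.prefix_of_prefix_length_le (l₃ := x ++ '.' :: jd (y :: M'))
                · rw [← hw]; exact List.prefix_append _ _
                · exact List.prefix_append _ _
                · omega
              rcases hpw with ⟨u, hu⟩
              have hu_ne : u ≠ [] := by
                intro h0
                have := congrArg List.length hu
                simp [h0] at this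
                omega
              rw [← hu, List.append_assoc] at hw
              have htail : '.' :: k = u ++ '.' :: jd (y :: M') :=
                List.append_cancel_left hw
              cases u with
              | nil => exact hu_ne rfl
              | cons c u' =>
                  rw [List.cons_append] at htail
                  injection htail with h1 _
                  have hmem : '.' ∈ x := by
                    rw [← hu]
                    refine List.mem_append_right w ?_
                    rw [h1]
                    exact List.mem_cons_self ..
                  exact absurd hmem (hdf x (List.mem_cons_self ..))
          · rintro ⟨S, hS, hne, hnL, rfl⟩
            rcases List.suffix_cons_iff.1 hS with rfl | hS'
            · exact absurd rfl hnL
            · rcases eq_or_ne S (y :: M') with rfl | hSne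
              · exact List.suffix_append _ _
              · have := (ih (by simp) hdfM (jd S)).2 ⟨S, hS', hne, hSne, rfl⟩
                exact this.trans ((List.suffix_cons _ _).trans (List.suffix_append _ _))

-- ---- facts about the two tables (decided once) ----

-- "key k matches d" exactly as A tests it: equal, or preceded by a dot.
def Matches (d k : List Char) : Prop := d = k ∨ ('.' :: k) <:+ d

-- bTable's items are aSuffixMap's pairs, with each key split into its labels.
theorem bTable_items_jd :
    bTable.items.map (fun q => (jd q.1, q.2)) = aSuffixMap.map (fun p => (p.1.toList, p.2)) := by
  decide

theorem bTable_keys_wf : ∀ q ∈ bTable.items, q.1 ≠ [] ∧ ∀ x ∈ q.1, '.' ∉ x := by decide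

theorem bTable_keys_nodup : bTable.keys.Nodup := by decide

-- no key of the table, prefixed with a dot, is a suffix of another key (as strings)
theorem keys_separated :
    ∀ p ∈ aSuffixMap, ∀ q ∈ aSuffixMap, ¬ ('.' :: p.1.toList) <:+ q.1.toList := by decide

-- equal key strings in aSuffixMap mean equal entries
theorem aEntries_unique :
    ∀ p ∈ aSuffixMap, ∀ q ∈ aSuffixMap, p.1.toList = q.1.toList → p = q := by decide

-- items of bTable ↔ entries of aSuffixMap, through jd
theorem pair_of_mem_items {k : List (List Char)} {v : String}
    (h : (k, v) ∈ bTable.items) : ∃ p ∈ aSuffixMap, p.1.toList = jd k ∧ p.2 = v := by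
  have hmem := List.mem_map_of_mem (f := fun q => (jd q.1, q.2)) h
  rw [bTable_items_jd] at hmem
  rcases List.mem_map.1 hmem with ⟨p, hp, he⟩
  refine ⟨p, hp, ?_, ?_⟩
  · simpa using congrArg Prod.fst he
  · simpa using congrArg Prod.snd he

theorem mem_items_of_pair {p : String × String} (hp : p ∈ aSuffixMap) :
    ∃ K, (K, p.2) ∈ bTable.items ∧ jd K = p.1.toList := by
  have hpm : (p.1.toList, p.2) ∈ aSuffixMap.map (fun p => (p.1.toList, p.2)) :=
    List.mem_map_of_mem hp
  rw [← bTable_items_jd] at hpm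
  rcases List.mem_map.1 hpm with ⟨q, hq, he⟩
  rw [Prod.mk.injEq] at he
  have hq' : (q.1, q.2) ∈ bTable.items := by simpa using hq
  exact ⟨q.1, he.2 ▸ hq', he.1⟩

-- two table keys matching the same d are equal (as strings)
theorem matches_unique {d : List Char} {p q : String × String}
    (hp : p ∈ aSuffixMap) (hq : q ∈ aSuffixMap)
    (mp : Matches d p.1.toList) (mq : Matches d q.1.toList) :
    p.1.toList = q.1.toList := by
  by_contra hne
  have sp' : p.1.toList <:+ d := by
    rcases mp with h | h
    · exact h ▸ List.suffix_refl _
    · exact (List.suffix_cons _ _).trans h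
  have sq : q.1.toList <:+ d := by
    rcases mq with h | h
    · exact h ▸ List.suffix_refl _
    · exact (List.suffix_cons _ _).trans h
  rcases List.suffix_or_suffix_of_suffix sp' sq with hss | hss
  · have hlt : p.1.toList.length < q.1.toList.length := by
      rcases lt_or_eq_of_le (List.IsSuffix.length_le hss) with h | h
      · exact h
      · exact absurd (List.IsSuffix.eq_of_length hss h) hne
    rcases mp with h | h
    · have h1 := List.IsSuffix.length_le sq
      have h2 : d.length = p.1.toList.length := by rw [h]
      omega
    · exact keys_separated p hp q hq
        (suffix_of_suffix_le h sq (by simpa using hlt))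
  · have hlt : q.1.toList.length < p.1.toList.length := by
      rcases lt_or_eq_of_le (List.IsSuffix.length_le hss) with h | h
      · exact h
      · exact absurd (List.IsSuffix.eq_of_length hss h).symm hne
    rcases mq with h | h
    · have h1 := List.IsSuffix.length_le sp'
      have h2 : d.length = q.1.toList.length := by rw [h]
      omega
    · exact keys_separated q hq p hp
        (suffix_of_suffix_le h sp' (by simpa using hlt))

-- table hit at a key list ↔ membership of the pair in items
theorem get?_of_mem {K : List (List Char)} {v : String}
    (h : (K, v) ∈ bTable.items) : bTable.get? K = some v :=
  PySem.Dict.get?_of_mem_items bTable h bTable_keys_nodup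

-- ---- characterizing A's loop ----

theorem aLoop_eq_none {d : List Char} {m : List (String × String)} :
    aLoop d m = none ↔ ∀ p ∈ m, ¬ Matches d p.1.toList := by
  induction m with
  | nil => simp [aLoop]
  | cons hd tl ih =>
      obtain ⟨s, n⟩ := hd
      simp only [aLoop]
      split_ifs with hc
      · constructor
        · intro h; cases h
        · intro h
          have hm : Matches d s.toList := by
            rcases hc with h' | h'
            · exact Or.inl h'
            · exact Or.inr ((PySem.Chars.endswith_iff _ _).1 h')
          exact absurd hm (h (s, n) (List.mem_cons_self ..))
      · rw [ih]
        constructor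
        · intro h p hp
          rcases List.mem_cons.1 hp with rfl | hp'
          · intro hm
            refine hc ?_
            rcases hm with h' | h'
            · exact Or.inl h'
            · exact Or.inr ((PySem.Chars.endswith_iff _ _).2 h')
          · exact h p hp'
        · intro h p hp; exact h p (List.mem_cons_of_mem _ hp)

theorem aLoop_eq_some {d : List Char} {m : List (String × String)} {n : String}
    (h : aLoop d m = some n) : ∃ p ∈ m, Matches d p.1.toList ∧ p.2 = n := by
  induction m with
  | nil => simp [aLoop] at h
  | cons hd tl ih =>
      obtain ⟨s, v⟩ := hd
      simp only [aLoop] at h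
      split_ifs at h with hc
      · obtain rfl : v = n := by injection h
        refine ⟨(s, v), List.mem_cons_self .., ?_, rfl⟩
        rcases hc with h' | h'
        · exact Or.inl h'
        · exact Or.inr ((PySem.Chars.endswith_iff _ _).1 h')
      · rcases ih h with ⟨p, hp, hm, hv⟩
        exact ⟨p, List.mem_cons_of_mem _ hp, hm, hv⟩

-- ---- characterizing B's while-loop ----

theorem bSeek_eq_none {ls : List (List Char)} :
    bSeek ls = none ↔ ∀ S, S <:+ ls → S ≠ [] → bTable.get? S = none := by
  induction ls with
  | nil =>
      simp only [bSeek]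
      constructor
      · intro _ S hS hne
        simp at hS
        exact absurd hS hne
      · intro _; trivial
  | cons x t ih =>
      simp only [bSeek]
      cases hg : bTable.get? (x :: t) with
      | some v =>
          constructor
          · intro h; cases h
          · intro h
            exact absurd (h (x :: t) (List.suffix_refl _) (by simp)) (by simp [hg])
      | none =>
          rw [ih]
          constructor
          · intro h S hS hne
            rcases List.suffix_cons_iff.1 hS with rfl | hS'
            · exact hg
            · exact h S hS' hne
          · intro h S hS hne
            exact h S (List.suffix_cons_iff.2 (Or.inr hS)) hne

theorem bSeek_eq_some {ls : List (List Char)} {v : String}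
    (h : bSeek ls = some v) : ∃ S, S <:+ ls ∧ bTable.get? S = some v := by
  induction ls with
  | nil => simp [bSeek] at h
  | cons x t ih =>
      simp only [bSeek] at h
      cases hg : bTable.get? (x :: t) with
      | some w =>
          rw [hg] at h
          obtain rfl : w = v := by injection h
          exact ⟨x :: t, List.suffix_refl _, hg⟩
      | none =>
          rw [hg] at h
          rcases ih h with ⟨S, hS, hgS⟩
          exact ⟨S, List.suffix_cons_iff.2 (Or.inr hS), hgS⟩

-- ---- the bridge: A's string match ↔ B's label-suffix hit ----

-- for a table key K, "K's string matches d" ↔ "K is a suffix of d's label list"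
theorem matches_iff_label_suffix {d : List Char} {K : List (List Char)}
    (hK : K ≠ []) (hKdf : ∀ x ∈ K, '.' ∉ x) :
    Matches d (jd K) ↔ K <:+ sp d := by
  have hL : sp d ≠ [] := sp_ne_nil d
  have hLdf : ∀ x ∈ sp d, '.' ∉ x := sp_dotfree d
  constructor
  · intro hm
    rcases hm with h | h
    · -- d = jd K: then sp d = K by injectivity through jd
      have : jd (sp d) = jd K := by rw [jd_sp]; exact h
      exact (jd_inj (sp d) K hL hK hLdf hKdf this) ▸ List.suffix_refl _
    · -- '.'::jd K <:+ d = jd (sp d)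
      rw [← jd_sp d] at h
      rcases (dotsuffix_iff (sp d) hL hLdf (jd K)).1 h with ⟨S, hS, hSne, _, hk⟩
      have hSdf : ∀ x ∈ S, '.' ∉ x := fun x hx => hLdf x (List.IsSuffix.subset hS hx)
      exact (jd_inj K S hK hSne hKdf hSdf hk) ▸ hS
  · intro hS
    rcases eq_or_ne K (sp d) with rfl | hne
    · exact Or.inl (by rw [jd_sp])
    · right
      rw [← jd_sp d]
      exact (dotsuffix_iff (sp d) hL hLdf (jd K)).2 ⟨K, hS, hK, hne, rfl⟩

-- ===== VERDICT (by name: the statement is the Claim_ definition above) =====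
theorem guess_site_name_py_spec : Claim_equal_guess_site_name_py := by
  intro domain _
  unfold Spec_guess_site_name_py guess_site_name_py guess_site_name_py_alt
  set d := PySem.Chars.lower domain.toList with hd
  by_cases hempty : d = []
  · simp [hempty]
  · rw [if_neg hempty, if_neg (by simpa [List.isEmpty_iff] using hempty), splitOn_eq_sp]
    cases hb : bSeek (sp d) with
    | some v =>
        -- B hit some label suffix S: the corresponding string matches d, so A hits too
        rcases bSeek_eq_some hb with ⟨S, hS, hgS⟩
        have hSit : (S, v) ∈ bTable.items := PySem.Dict.mem_items_of_get?_eq_some bTable hgS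
        rcases pair_of_mem_items hSit with ⟨p, hp, hk, hv⟩
        obtain ⟨hSne, hSdf⟩ := bTable_keys_wf (S, v) hSit
        have hm : Matches d p.1.toList := by
          rw [hk]; exact (matches_iff_label_suffix hSne hSdf).2 hS
        cases ha : aLoop d aSuffixMap with
        | none => exact absurd hm (aLoop_eq_none.1 ha p hp)
        | some n =>
            rcases aLoop_eq_some ha with ⟨q, hq, hmq, hvq⟩
            have hkey := matches_unique hq hp hmq hm
            obtain rfl : q = p := aEntries_unique q hq p hp hkey
            rw [← hvq, hv]
    | none =>
        -- B missed every label suffix: no key string matches d, so A's loop misses too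
        rw [aLoop_eq_none.2]
        intro p hp hm
        rcases mem_items_of_pair hp with ⟨K, hKit, hKjd⟩
        obtain ⟨hKne, hKdf⟩ := bTable_keys_wf (K, p.2) hKit
        have hKS : K <:+ sp d :=
          (matches_iff_label_suffix hKne hKdf).1 (hKjd ▸ hm)
        have := bSeek_eq_none.1 hb K hKS hKne
        rw [get?_of_mem hKit] at this
        cases this
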